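-- pv_equiv track=rewrite | github.com/misterESTL/neworders-gui | lib/model.py | buildEverestData
-- ===== SOURCE A (Python) =====
-- def buildEverestData(order):
--     data = [['Order ID', 'Line ID', 'Product ID','Product Code',
--                     'Quantity', 'Unit Price']]
--
--     for row in order:
--         newRow = [''] * 6
--         for i, cell in enumerate(row):
--             if i == 0:
--                 newRow[1] = cell
--             elif i == 1:
--                 newRow[0] = cell
--             elif i == 3:
--                 newRow[2] = cell
--                 newRow[3] = cell
--             elif i == 6:
--                 newRow[5] = cell
--             elif i == 7:
--                 newRow[4] = cell
--         data.append(newRow)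
--
--     return data
-- ===== SOURCE B (Python) =====
-- def buildEverestData(order):
--     # Column-major construction: build each output column as a full pass over
--     # all rows, then transpose the six columns into rows.
--     def column(src):
--         return [row[src] if len(row) > src else '' for row in order]
--     cols = [column(s) for s in (1, 0, 3, 3, 7, 6)]
--     return [['Order ID', 'Line ID', 'Product ID', 'Product Code',
--              'Quantity', 'Unit Price']] + [list(t) for t in zip(*cols)]
-- ===== Notes on version B (the rewrite author's own statement) =====
-- stated objective: alternative
-- what changed: Replaces A's row-wise scan with index-dispatch assignments by a column-major construction: six staged passes each build one whole output column from its source index, and the columns are transposed (zip) into rows.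
import Mathlib
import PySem

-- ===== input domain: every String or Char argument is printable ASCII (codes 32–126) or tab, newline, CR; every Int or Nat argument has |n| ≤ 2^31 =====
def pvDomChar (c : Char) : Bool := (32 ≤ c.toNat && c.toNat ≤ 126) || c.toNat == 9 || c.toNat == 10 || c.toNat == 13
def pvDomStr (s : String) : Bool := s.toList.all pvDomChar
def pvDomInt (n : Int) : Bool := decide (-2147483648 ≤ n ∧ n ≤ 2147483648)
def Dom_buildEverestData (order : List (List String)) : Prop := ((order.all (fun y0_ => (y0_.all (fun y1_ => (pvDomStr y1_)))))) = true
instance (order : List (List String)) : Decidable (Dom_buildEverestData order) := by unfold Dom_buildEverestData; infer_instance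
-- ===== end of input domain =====

-- ===== PORT A =====
-- B builds the output column-major (one staged pass per output column, then a transpose); return-value equivalence only.
def pvHeader : List String :=
  ["Order ID", "Line ID", "Product ID", "Product Code", "Quantity", "Unit Price"]

-- one step of A's inner loop: dispatch on the enumerated index, assign into newRow
def pvUpdate (nr : List String) (i : Int) (cell : String) : List String :=
  if i = 0 then nr.set 1 cell
  else if i = 1 then nr.set 0 cell
  else if i = 3 then (nr.set 2 cell).set 3 cell
  else if i = 6 then nr.set 5 cell
  else if i = 7 then nr.set 4 cell
  else nr

def buildEverestData (order : List (List String)) : List (List String) :=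
  order.foldl
    (fun data row =>
      data ++ [(PySem.List.enumerate row).foldl (fun nr p => pvUpdate nr p.1 p.2)
                 (List.replicate 6 "")])
    [pvHeader]

-- ===== PORT B =====
-- one output column: the cell at source index `src` of every row (or '' when short)
def pvColumn (order : List (List String)) (src : Nat) : List String :=
  order.map (fun row => if row.length > src then row.getD src "" else "")

-- transpose six equal-length columns into rows (Python's zip over the six columns)
def pvZip6 : List String → List String → List String → List String → List String → List String → List (List String)
  | a :: as, b :: bs, c :: cs, d :: ds, e :: es, f :: fs =>
      [a, b, c, d, e, f] :: pvZip6 as bs cs ds es fs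
  | _, _, _, _, _, _ => []

def buildEverestData_alt (order : List (List String)) : List (List String) :=
  pvHeader :: pvZip6 (pvColumn order 1) (pvColumn order 0) (pvColumn order 3)
                     (pvColumn order 3) (pvColumn order 7) (pvColumn order 6)

-- ===== PRECONDITION & SPEC =====
def Spec_buildEverestData (order : List (List String)) (out : List (List String)) : Prop := out = buildEverestData_alt order
instance (order : List (List String)) (out : List (List String)) : Decidable (Spec_buildEverestData order out) := by unfold Spec_buildEverestData; infer_instance

-- ===== CLAIM (what is proved, stated in full; the proofs are below) =====
def Claim_equal_buildEverestData : Prop := ∀ (order : List (List String)), Dom_buildEverestData order → Spec_buildEverestData order (buildEverestData order)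

-- ===== LEMMAS AND PROOFS =====

-- the six-slot row A's inner loop produces, written directly
def pvRowA (row : List String) : List String :=
  [if row.length > 1 then row.getD 1 "" else "",
   if row.length > 0 then row.getD 0 "" else "",
   if row.length > 3 then row.getD 3 "" else "",
   if row.length > 3 then row.getD 3 "" else "",
   if row.length > 7 then row.getD 7 "" else "",
   if row.length > 6 then row.getD 6 "" else ""]

-- A's inner loop ignores cells whose index is ≥ 8
theorem pv_fold_ge8 (t : List String) (s : Int) (hs : 8 ≤ s) (nr : List String) :
    (PySem.List.enumerate t s).foldl (fun nr p => pvUpdate nr p.1 p.2) nr = nr := by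
  induction t generalizing s nr with
  | nil => rfl
  | cons x xs ih =>
    rw [PySem.List.enumerate_cons, List.foldl_cons]
    have h : pvUpdate nr s x = nr := by
      unfold pvUpdate
      have h0 : ¬ s = 0 := by omega
      have h1 : ¬ s = 1 := by omega
      have h3 : ¬ s = 3 := by omega
      have h6 : ¬ s = 6 := by omega
      have h7 : ¬ s = 7 := by omega
      simp [h0, h1, h3, h6, h7]
    rw [h]
    exact ih (s + 1) (by omega) nr

-- per-row: A's scan with branch-dispatch equals the direct six-slot row
theorem pv_row_eq (row : List String) :
    (PySem.List.enumerate row).foldl (fun nr p => pvUpdate nr p.1 p.2) (List.replicate 6 "")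
      = pvRowA row := by
  match row with
  | [] => rfl
  | [a] => rfl
  | [a, b] => rfl
  | [a, b, c] => rfl
  | [a, b, c, d] => rfl
  | [a, b, c, d, e] => rfl
  | [a, b, c, d, e, f] => rfl
  | [a, b, c, d, e, f, g] => rfl
  | a :: b :: c :: d :: e :: f :: g :: h :: t =>
    have he : PySem.List.enumerate (a :: b :: c :: d :: e :: f :: g :: h :: t) (0 : Int)
        = [((0:Int), a), (1, b), (2, c), (3, d), (4, e), (5, f), (6, g), (7, h)]
            ++ PySem.List.enumerate t 8 := by
      simp [PySem.List.enumerate_cons]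
    rw [he, List.foldl_append, pv_fold_ge8 t 8 (by omega)]
    simp [pvUpdate, pvRowA]

theorem pv_foldl_append (l : List (List String)) (acc : List (List String)) :
    l.foldl (fun data row =>
        data ++ [(PySem.List.enumerate row).foldl (fun nr p => pvUpdate nr p.1 p.2)
                   (List.replicate 6 "")]) acc
      = acc ++ l.map pvRowA := by
  induction l generalizing acc with
  | nil => simp
  | cons r t ih => rw [List.foldl_cons, ih, pv_row_eq]; simp

-- zipping the six mapped columns rebuilds the row-wise map
theorem pv_zip6_columns (l : List (List String)) :
    pvZip6 (pvColumn l 1) (pvColumn l 0) (pvColumn l 3)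
           (pvColumn l 3) (pvColumn l 7) (pvColumn l 6) = l.map pvRowA := by
  induction l with
  | nil => rfl
  | cons r t ih =>
    simp only [pvColumn, List.map_cons, pvZip6]
    rw [← pvColumn, ← pvColumn, ← pvColumn, ← pvColumn, ← pvColumn, ih]
    rfl

-- ===== VERDICT (by name: the statement is the Claim_ definition above) =====
theorem buildEverestData_spec : Claim_equal_buildEverestData := by
  intro order _
  unfold Spec_buildEverestData buildEverestData buildEverestData_alt
  rw [pv_foldl_append, pv_zip6_columns]
  rfl
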